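-- pv_equiv track=rewrite | github.com/Hannah-Zhang0725/pythonProject1 | lmps.py | print_chords
-- ===== SOURCE A (Python) =====
-- def print_chords(labels, dp, i, j):
--     result = []
--     if i>=j:
--         return result
--     if labels[i] == labels[j] and dp[i][j] == dp[i + 1][j - 1] + 1:
--         result.append((i,j))
--         result.extend(print_chords(labels, dp, i + 1, j - 1))
--     elif dp[i][j] == dp[i][j - 1]:
--         result.extend(print_chords(labels, dp, i, j - 1))
--     else:
--         for k in range(i, j):
--             if labels[k] == labels[j] and dp[i][j] == dp[i][k - 1] + dp[k + 1][j - 1] + 1: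
--                 result.extend(print_chords(labels, dp, i, k - 1))
--                 result.append((k,j))
--                 result.extend(print_chords(labels, dp, k + 1, j - 1))
--                 break
--     return result
-- ===== SOURCE B (Python) =====
-- def print_chords(labels, dp, i, j):
--     # Iterative traceback: explicit stack of ('expand'/'emit') tasks replacing A's recursion.
--     result = []
--     stack = [('expand', i, j)]
--     while stack:
--         tag, x, y = stack.pop()
--         if tag == 'emit':
--             result.append((x, y))
--             continue
--         if x >= y:
--             continue
--         if labels[x] == labels[y] and dp[x][y] == dp[x + 1][y - 1] + 1:
--             stack.append(('expand', x + 1, y - 1))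
--             stack.append(('emit', x, y))
--         elif dp[x][y] == dp[x][y - 1]:
--             stack.append(('expand', x, y - 1))
--         else:
--             for k in range(x, y):
--                 if labels[k] == labels[y] and dp[x][y] == dp[x][k - 1] + dp[k + 1][y - 1] + 1:
--                     stack.append(('expand', k + 1, y - 1))
--                     stack.append(('emit', k, y))
--                     stack.append(('expand', x, k - 1))
--                     break
--     return result
-- ===== Notes on version B (the rewrite author's own statement) =====
-- stated objective: alternative
-- what changed: A's recursive traceback over the DP table is replaced by an iterative worklist: an explicit stack of ('expand', i, j) / ('emit', x, y) tasks, pushed in reverse so pairs are appended in exactly A's emission order; no recursion remains.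
-- outside the precondition, e.g. on print_chords(['a', 'b'], [[0, 0], [0, 0]], -2, 1): A returns [], B returns []
import Mathlib
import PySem

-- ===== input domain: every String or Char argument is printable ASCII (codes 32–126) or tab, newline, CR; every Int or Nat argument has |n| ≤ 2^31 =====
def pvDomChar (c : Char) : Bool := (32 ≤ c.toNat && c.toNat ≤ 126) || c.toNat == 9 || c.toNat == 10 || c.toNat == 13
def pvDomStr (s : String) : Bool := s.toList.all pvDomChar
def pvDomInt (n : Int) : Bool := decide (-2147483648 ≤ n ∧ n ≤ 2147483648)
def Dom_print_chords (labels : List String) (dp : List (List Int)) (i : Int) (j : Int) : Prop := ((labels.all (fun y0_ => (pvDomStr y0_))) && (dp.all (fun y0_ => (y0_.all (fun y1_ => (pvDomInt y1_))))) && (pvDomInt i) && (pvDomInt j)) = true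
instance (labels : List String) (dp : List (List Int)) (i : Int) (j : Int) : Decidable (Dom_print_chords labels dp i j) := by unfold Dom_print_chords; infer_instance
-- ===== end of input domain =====

-- B re-implements A's recursive DP traceback as an iterative explicit-stack machine (same pairs
-- in the same order); objective: alternative decomposition, same asymptotic cost.

-- ===== PORT A =====
-- shared index accessors: labels[t] and dp[a][b] (Python wraparound semantics; defaults only
-- outside Pre_, where Python raises)
def pcLab (labels : List String) (t : Int) : String := PySem.List.pyGetD labels t ""
def pcDp (dp : List (List Int)) (a b : Int) : Int := PySem.List.pyGetD (PySem.List.pyGetD dp a []) b 0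
-- the for-k loop's break condition
def pcCond (labels : List String) (dp : List (List Int)) (i j k : Int) : Bool :=
  (pcLab labels k == pcLab labels j) && (pcDp dp i j == pcDp dp i (k - 1) + pcDp dp (k + 1) (j - 1) + 1)

def print_chords (labels : List String) (dp : List (List Int)) (i : Int) (j : Int) : List (Int × Int) :=
  if i ≥ j then []
  else if pcLab labels i == pcLab labels j && pcDp dp i j == pcDp dp (i + 1) (j - 1) + 1 then
    (i, j) :: print_chords labels dp (i + 1) (j - 1)
  else if pcDp dp i j == pcDp dp i (j - 1) then
    print_chords labels dp i (j - 1)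
  else
    -- 'for k in range(i, j): if cond: …; break' = act on the first k in range(i,j) with cond
    match hk : (PySem.List.pyRange i j 1).find? (pcCond labels dp i j) with
    | none => []
    | some k => print_chords labels dp i (k - 1) ++ (k, j) :: print_chords labels dp (k + 1) (j - 1)
termination_by (j - i).toNat
decreasing_by
  all_goals first
    | omega
    | (have hm := PySem.List.mem_pyRange_one.mp (List.mem_of_find?_eq_some hk); omega)

-- ===== PORT B =====
inductive PCTask where
  | expand : Int → Int → PCTask
  | emit : Int → Int → PCTask
deriving DecidableEq, Repr

def pcWeight : PCTask → Nat
  | .expand a b => 4 * (b - a).toNat + 2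
  | .emit _ _ => 1

def pcRun (labels : List String) (dp : List (List Int)) : List PCTask → List (Int × Int) → List (Int × Int)
  | [], acc => acc
  | .emit x y :: ts, acc => pcRun labels dp ts (acc ++ [(x, y)])
  | .expand x y :: ts, acc =>
    if x ≥ y then pcRun labels dp ts acc
    else if pcLab labels x == pcLab labels y && pcDp dp x y == pcDp dp (x + 1) (y - 1) + 1 then
      pcRun labels dp (.emit x y :: .expand (x + 1) (y - 1) :: ts) acc
    else if pcDp dp x y == pcDp dp x (y - 1) then
      pcRun labels dp (.expand x (y - 1) :: ts) acc
    else
      match hk : (PySem.List.pyRange x y 1).find? (pcCond labels dp x y) with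
      | none => pcRun labels dp ts acc
      | some k => pcRun labels dp (.expand x (k - 1) :: .emit k y :: .expand (k + 1) (y - 1) :: ts) acc
termination_by ts _ => (ts.map pcWeight).sum
decreasing_by
  all_goals try have hm := PySem.List.mem_pyRange_one.mp (List.mem_of_find?_eq_some hk)
  all_goals simp [pcWeight]
  all_goals omega

def print_chords_alt (labels : List String) (dp : List (List Int)) (i : Int) (j : Int) : List (Int × Int) :=
  pcRun labels dp [.expand i j] []

-- ===== PRECONDITION & SPEC =====
-- Pre_ excludes i<j inputs with a negative i, a j beyond labels, or a dp that is not a square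
-- matrix over labels: there Python A either raises IndexError or returns only via accidental
-- negative-index wraparound (B, indexing identically, returns the same value wherever A returns).
def Pre_print_chords (labels : List String) (dp : List (List Int)) (i : Int) (j : Int) : Prop :=
  i ≥ j ∨ (0 ≤ i ∧ j < (labels.length : Int) ∧ dp.length = labels.length ∧ ∀ row ∈ dp, row.length = labels.length)
instance (labels : List String) (dp : List (List Int)) (i : Int) (j : Int) : Decidable (Pre_print_chords labels dp i j) := by unfold Pre_print_chords; infer_instance

def pvWitness_print_chords : List String × List (List Int) × Int × Int :=
  (["a", "b", "a"], [[1, 1, 2], [0, 1, 1], [0, 0, 1]], 0, 2)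

def Spec_print_chords (labels : List String) (dp : List (List Int)) (i : Int) (j : Int) (out : List (Int × Int)) : Prop := out = print_chords_alt labels dp i j
instance (labels : List String) (dp : List (List Int)) (i : Int) (j : Int) (out : List (Int × Int)) : Decidable (Spec_print_chords labels dp i j out) := by unfold Spec_print_chords; infer_instance

-- ===== CLAIM (what is proved, stated in full; the proofs are below) =====
def Claim_equal_print_chords : Prop := ∀ (labels : List String) (dp : List (List Int)) (i : Int) (j : Int), Dom_print_chords labels dp i j → Pre_print_chords labels dp i j → Spec_print_chords labels dp i j (print_chords labels dp i j)

-- ===== LEMMAS AND PROOFS =====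

-- popping an 'expand i j' task runs A's whole recursion for (i, j) and appends its result
lemma pcRun_expand (labels : List String) (dp : List (List Int)) :
    ∀ (g : Nat) (i j : Int), (j - i).toNat ≤ g → ∀ (ts : List PCTask) (acc : List (Int × Int)),
      pcRun labels dp (.expand i j :: ts) acc = pcRun labels dp ts (acc ++ print_chords labels dp i j) := by
  intro g
  induction g with
  | zero =>
    intro i j hg ts acc
    have hij : i ≥ j := by omega
    rw [pcRun, print_chords]
    simp [hij]
  | succ g ih =>
    intro i j hg ts acc
    by_cases hij : i ≥ j
    · rw [pcRun, print_chords]; simp [hij]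
    · rw [pcRun, print_chords]
      simp only [hij, if_false]
      by_cases h1 : (pcLab labels i == pcLab labels j && (pcDp dp i j == pcDp dp (i + 1) (j - 1) + 1)) = true
      · simp only [h1, if_true]
        rw [pcRun, ih (i + 1) (j - 1) (by omega)]
        simp
      · simp only [h1, Bool.false_eq_true, if_false]
        by_cases h2 : (pcDp dp i j == pcDp dp i (j - 1)) = true
        · simp only [h2, if_true]
          rw [ih i (j - 1) (by omega)]
        · simp only [h2, Bool.false_eq_true, if_false]
          cases hk : (PySem.List.pyRange i j 1).find? (pcCond labels dp i j) with
          | none => simp only [hk]; simp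
          | some k =>
            have hm := PySem.List.mem_pyRange_one.mp (List.mem_of_find?_eq_some hk)
            simp only [hk]
            rw [ih i (k - 1) (by omega), pcRun, ih (k + 1) (j - 1) (by omega)]
            simp

-- ===== VERDICT (by name: the statement is the Claim_ definition above) =====
theorem print_chords_spec : Claim_equal_print_chords := by
  intro labels dp i j _ _
  unfold Spec_print_chords print_chords_alt
  rw [pcRun_expand labels dp (j - i).toNat i j le_rfl]
  rw [pcRun]
  simp
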